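-- pv_equiv track=rewrite | github.com/yifan3403-lab/facetta-backend | Web-based plugin/app_server.py | rec_from_label
-- ===== SOURCE A (Python) =====
-- def rec_from_label(lbl: str) -> str:
--     s = lbl.lower()
--     if any(x in s for x in ["subway","metro","underground","public transport","train","station","platform"]):
--         return "推荐：只展示大纲"
--     if any(x in s for x in [
--         "street","traffic","vehicle","car","bus","truck","motorcycle","horn",
--         "outdoor","crowd","speech","talking","conversation",
--         "applause","clap","clapping","cheering","laughter",
--         "music","instrument","singing","tv","radio",
--         "construction","drill","hammer","ambulance","fire engine","siren",
--         "dog","dogs","bird","birds"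
--     ]):
--         return "推荐：推送音频界面"
--     if any(x in s for x in ["silence","quiet","typing","keyboard","mouse click","paper","indoor","room","office"]):
--         return "推荐：详细完整界面"
--     return "推荐：详细完整界面"
-- ===== SOURCE B (Python) =====
-- _TIER1 = ["subway", "metro", "underground", "public transport", "train", "station", "platform"]
-- _TIER2 = [
--     "street", "traffic", "vehicle", "car", "bus", "truck", "motorcycle", "horn",
--     "outdoor", "crowd", "speech", "talking", "conversation",
--     "applause", "clap", "clapping", "cheering", "laughter",
--     "music", "instrument", "singing", "tv", "radio",
--     "construction", "drill", "hammer", "ambulance", "fire engine", "siren",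
--     "dog", "dogs", "bird", "birds",
-- ]
-- _TABLE = [(k, "推荐：只展示大纲") for k in _TIER1] + [(k, "推荐：推送音频界面") for k in _TIER2]
-- _DEFAULT = "推荐：详细完整界面"
--
--
-- def rec_from_label(lbl: str) -> str:
--     s = lbl.lower()
--     for kw, rec in _TABLE:
--         if kw in s:
--             return rec
--     return _DEFAULT
-- ===== Notes on version B (the rewrite author's own statement) =====
-- stated objective: simpler
-- what changed: Replaces the three separate any()-scans and the redundant tier-3 branch with one priority-ordered (keyword, recommendation) table scanned by a single first-match loop returning the default when nothing matches.
import Mathlib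
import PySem

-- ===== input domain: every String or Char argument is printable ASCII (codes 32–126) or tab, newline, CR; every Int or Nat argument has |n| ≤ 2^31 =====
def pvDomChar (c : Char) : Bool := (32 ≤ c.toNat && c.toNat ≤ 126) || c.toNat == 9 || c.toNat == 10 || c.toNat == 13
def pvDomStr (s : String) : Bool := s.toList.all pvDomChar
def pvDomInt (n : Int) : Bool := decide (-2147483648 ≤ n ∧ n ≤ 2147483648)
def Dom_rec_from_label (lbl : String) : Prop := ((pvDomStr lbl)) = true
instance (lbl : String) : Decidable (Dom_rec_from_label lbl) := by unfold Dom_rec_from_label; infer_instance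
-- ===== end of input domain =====

-- B replaces A's three separate any()-scans (tier 3 being redundant with the default) by one
-- priority-ordered (keyword, recommendation) table scanned with a single first-match loop; same cost, simpler.


-- ===== PORT A =====
def rec_from_label (lbl : String) : String :=
  let s := PySem.Str.lower lbl
  if ["subway", "metro", "underground", "public transport", "train", "station",
      "platform"].any (fun x => PySem.Str.isIn x s) then
    "推荐：只展示大纲"
  else if ["street", "traffic", "vehicle", "car", "bus", "truck", "motorcycle", "horn",
      "outdoor", "crowd", "speech", "talking", "conversation",
      "applause", "clap", "clapping", "cheering", "laughter",
      "music", "instrument", "singing", "tv", "radio",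
      "construction", "drill", "hammer", "ambulance", "fire engine", "siren",
      "dog", "dogs", "bird", "birds"].any (fun x => PySem.Str.isIn x s) then
    "推荐：推送音频界面"
  else if ["silence", "quiet", "typing", "keyboard", "mouse click", "paper", "indoor",
      "room", "office"].any (fun x => PySem.Str.isIn x s) then
    "推荐：详细完整界面"
  else
    "推荐：详细完整界面"

-- ===== PORT B =====
def pvTier1 : List String :=
  ["subway", "metro", "underground", "public transport", "train", "station", "platform"]

def pvTier2 : List String :=
  ["street", "traffic", "vehicle", "car", "bus", "truck", "motorcycle", "horn",
   "outdoor", "crowd", "speech", "talking", "conversation",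
   "applause", "clap", "clapping", "cheering", "laughter",
   "music", "instrument", "singing", "tv", "radio",
   "construction", "drill", "hammer", "ambulance", "fire engine", "siren",
   "dog", "dogs", "bird", "birds"]

def pvTable : List (String × String) :=
  pvTier1.map (fun k => (k, "推荐：只展示大纲")) ++ pvTier2.map (fun k => (k, "推荐：推送音频界面"))

def pvDefault : String := "推荐：详细完整界面"

-- first-match loop over the table
def pvScan (s : String) : List (String × String) → String
  | [] => pvDefault
  | (kw, rec) :: rest => if PySem.Str.isIn kw s then rec else pvScan s rest

def rec_from_label_alt (lbl : String) : String :=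
  pvScan (PySem.Str.lower lbl) pvTable

-- ===== PRECONDITION & SPEC =====
def Spec_rec_from_label (lbl : String) (out : String) : Prop := out = rec_from_label_alt lbl
instance (lbl : String) (out : String) : Decidable (Spec_rec_from_label lbl out) := by unfold Spec_rec_from_label; infer_instance

-- ===== CLAIM (what is proved, stated in full; the proofs are below) =====
def Claim_equal_rec_from_label : Prop := ∀ (lbl : String), Dom_rec_from_label lbl → Spec_rec_from_label lbl (rec_from_label lbl)

-- ===== LEMMAS AND PROOFS =====

-- scanning a constant-valued block returns the constant iff some keyword matches
theorem pvScan_map_append (s : String) (r : String) (kws : List String)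
    (rest : List (String × String)) :
    pvScan s (kws.map (fun k => (k, r)) ++ rest) =
      if kws.any (fun k => PySem.Str.isIn k s) then r else pvScan s rest := by
  induction kws with
  | nil => simp
  | cons k ks ih =>
    simp only [List.map_cons, List.cons_append, List.any_cons]
    show (if PySem.Str.isIn k s then r else pvScan s (List.map (fun k => (k, r)) ks ++ rest)) = _
    rw [ih]
    rcases Bool.eq_false_or_eq_true (PySem.Str.isIn k s) with h | h <;> simp only [h] <;> simp

-- ===== VERDICT (by name: the statement is the Claim_ definition above) =====
theorem rec_from_label_spec : Claim_equal_rec_from_label := by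
  intro lbl _
  show rec_from_label lbl = rec_from_label_alt lbl
  unfold rec_from_label_alt pvTable
  rw [← List.append_nil (List.map (fun k => (k, "推荐：推送音频界面")) pvTier2),
      ← List.append_assoc, List.append_assoc, pvScan_map_append, pvScan_map_append]
  simp only [rec_from_label, pvTier1, pvTier2, pvScan, pvDefault]
  split_ifs <;> rfl
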